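-- pv_equiv track=rewrite | github.com/crosswordnexus/variety-tools | spiral/crushword_create_json.py | multi_slice
-- ===== SOURCE A (Python) =====
-- def multi_slice(seq, cutpoints):
--     """Slice a sequence into chunks defined by cutpoints."""
--     k = len(cutpoints)
--     if k == 0:
--         return [seq]
--     multislices = [seq[:cutpoints[0]]]
--     multislices.extend(seq[cutpoints[i]:cutpoints[i+1]] for i in range(k-1))
--     multislices.append(seq[cutpoints[k-1]:])
--     return multislices
-- ===== SOURCE B (Python) =====
-- def multi_slice(seq, cutpoints):
--     """Slice a sequence into chunks defined by cutpoints."""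
--     chunks = []
--     end = len(seq)
--     for c in reversed(cutpoints):
--         chunks.append(seq[c:end])
--         end = c
--     chunks.append(seq[:end])
--     chunks.reverse()
--     return chunks
-- ===== Notes on version B (the rewrite author's own statement) =====
-- stated objective: alternative
-- what changed: Replaces A's front-to-back staged construction (special-cased head slice, index-based middle generator over range(k-1), appended tail) by building the chunk list back-to-front: one loop over reversed(cutpoints) carrying the current upper boundary, then a final head chunk and a reversal of the result.
import Mathlib
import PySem

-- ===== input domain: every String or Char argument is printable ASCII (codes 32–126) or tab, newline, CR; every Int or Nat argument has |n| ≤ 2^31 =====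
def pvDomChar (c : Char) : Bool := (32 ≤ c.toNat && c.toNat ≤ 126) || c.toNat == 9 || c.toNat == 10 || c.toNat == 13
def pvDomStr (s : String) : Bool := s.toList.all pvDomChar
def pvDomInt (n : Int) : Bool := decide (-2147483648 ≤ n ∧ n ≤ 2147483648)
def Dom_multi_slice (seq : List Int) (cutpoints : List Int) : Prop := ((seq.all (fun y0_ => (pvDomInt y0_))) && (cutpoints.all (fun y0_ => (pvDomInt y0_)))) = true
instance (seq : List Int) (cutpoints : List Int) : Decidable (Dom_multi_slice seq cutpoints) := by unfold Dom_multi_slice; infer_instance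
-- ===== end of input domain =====

-- B builds the chunk list back-to-front (loop over reversed cutpoints carrying the
-- upper boundary, then reverse) instead of A's staged head/middle-generator/tail
-- construction (objective: alternative, same cost).

-- ===== PORT A =====
-- Python A: k = len(cutpoints); if k == 0: return [seq];
-- head slice, middle generator over range(k-1), tail slice.
-- cutpoints[i] is always a valid non-negative index here, so List.getD is exact.
def multi_slice (seq : List Int) (cutpoints : List Int) : List (List Int) :=
  let k := cutpoints.length
  if k = 0 then [seq]
  else
    ([PySem.List.slice seq none (some (cutpoints.getD 0 0))]
      ++ (List.range (k - 1)).map (fun i =>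
            PySem.List.slice seq (some (cutpoints.getD i 0)) (some (cutpoints.getD (i + 1) 0))))
      ++ [PySem.List.slice seq (some (cutpoints.getD (k - 1) 0)) none]

-- ===== PORT B =====
-- chunks = []; end = len(seq); for c in reversed(cutpoints): chunks.append(seq[c:end]); end = c
-- chunks.append(seq[:end]); chunks.reverse(); return chunks
def multi_slice_alt (seq : List Int) (cutpoints : List Int) : List (List Int) :=
  let st := cutpoints.reverse.foldl
    (fun (st : List (List Int) × Int) (c : Int) =>
      (st.1 ++ [PySem.List.slice seq (some c) (some st.2)], c))
    ([], (seq.length : Int))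
  (st.1 ++ [PySem.List.slice seq none (some st.2)]).reverse

-- ===== PRECONDITION & SPEC =====
def Spec_multi_slice (seq : List Int) (cutpoints : List Int) (out : List (List Int)) : Prop := out = multi_slice_alt seq cutpoints
instance (seq : List Int) (cutpoints : List Int) (out : List (List Int)) : Decidable (Spec_multi_slice seq cutpoints out) := by unfold Spec_multi_slice; infer_instance

-- ===== CLAIM (what is proved, stated in full; the proofs are below) =====
def Claim_equal_multi_slice : Prop := ∀ (seq : List Int) (cutpoints : List Int), Dom_multi_slice seq cutpoints → Spec_multi_slice seq cutpoints (multi_slice seq cutpoints)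

-- ===== LEMMAS AND PROOFS =====

-- forward chunk list: one slice per cutpoint, last one up to len(seq)
def goN (seq : List Int) (prev : Int) : List Int → List (List Int)
  | [] => [PySem.List.slice seq (some prev) (some (seq.length : Int))]
  | c :: cs => PySem.List.slice seq (some prev) (some c) :: goN seq c cs

-- seq[a:] = seq[a:len(seq)]
theorem slice_none_eq_len (seq : List Int) (a : Int) :
    PySem.List.slice seq (some a) none = PySem.List.slice seq (some a) (some (seq.length : Int)) := by
  simp [PySem.List.slice]

-- the reversed-fold accumulates exactly the reverse of the forward chunk list, final end = first cutpoint
theorem revfold_eq (seq : List Int) (cs : List Int) : ∀ (c : Int) (acc : List (List Int)),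
    List.foldl
      (fun (st : List (List Int) × Int) (x : Int) =>
        (st.1 ++ [PySem.List.slice seq (some x) (some st.2)], x))
      (acc, (seq.length : Int)) ((c :: cs).reverse)
    = (acc ++ (goN seq c cs).reverse, c) := by
  induction cs with
  | nil => intro c acc; simp [goN]
  | cons c1 cs' ih =>
      intro c acc
      have : (c :: c1 :: cs').reverse = (c1 :: cs').reverse ++ [c] := by simp
      rw [this, List.foldl_append, ih c1 acc]
      simp [goN]

-- A's middle-plus-tail part equals the forward chunk list started at the first cutpoint.
theorem a_tail_eq (seq : List Int) (c : Int) (cs : List Int) :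
    (List.range ((c :: cs).length - 1)).map (fun i =>
        PySem.List.slice seq (some ((c :: cs).getD i 0)) (some ((c :: cs).getD (i + 1) 0)))
      ++ [PySem.List.slice seq (some ((c :: cs).getD ((c :: cs).length - 1) 0)) none]
      = goN seq c cs := by
  induction cs generalizing c with
  | nil => simp [goN, slice_none_eq_len]
  | cons c1 cs' ih =>
      have hlen : (c :: c1 :: cs').length - 1 = cs'.length + 1 := by simp
      rw [hlen, List.range_succ_eq_map, List.map_cons, List.map_map]
      have hih := ih c1
      simp only [List.length_cons, Nat.add_sub_cancel] at hih
      rw [goN, ← hih]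
      simp [Function.comp, List.getD]
      try rfl

theorem main_eq (seq : List Int) (cutpoints : List Int) :
    multi_slice seq cutpoints = multi_slice_alt seq cutpoints := by
  unfold multi_slice multi_slice_alt
  cases cutpoints with
  | nil => simp [PySem.List.slice]
  | cons c cs =>
      simp only [List.length_cons]
      rw [if_neg (by omega)]
      rw [revfold_eq seq cs c []]
      simp only [List.nil_append, List.reverse_append, List.reverse_reverse,
        List.reverse_cons, List.reverse_nil, List.nil_append, List.cons_append]
      have h := a_tail_eq seq c cs
      simp only [List.length_cons, Nat.add_sub_cancel] at h
      rw [← h]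
      simp [List.getD]

-- ===== VERDICT (by name: the statement is the Claim_ definition above) =====
theorem multi_slice_spec : Claim_equal_multi_slice := by
  intro seq cutpoints _
  exact main_eq seq cutpoints
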